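-- pv_equiv track=rewrite | github.com/rajmohanutopai/dina | scripts/tag_integration_code.py | format_id_comment
-- ===== SOURCE A (Python) =====
-- def format_id_comment(ids):
--     """Format IDs into comment lines, wrapping at ~100 chars."""
--     if not ids:
--         return []
--
--     lines = []
--     current = "#"
--     for i, tag_id in enumerate(ids):
--         sep = ", " if i > 0 else " "
--         candidate = current + sep + tag_id
--         if len(candidate) > 100 and i > 0:
--             lines.append(current)
--             current = "# " + tag_id
--         else:
--             current = candidate
--     if current != "#":
--         lines.append(current)
--     return lines
-- ===== SOURCE B (Python) =====
-- def format_id_comment(ids):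
--     """Format IDs into comment lines, wrapping at ~100 chars.
--
--     Chunking decomposition: consume the ids front-to-back, taking as many as
--     fit on one line (tracked by an arithmetic length counter), then render
--     each group with a single join -- no incremental string concatenation.
--     """
--     lines = []
--     it = iter(ids)
--     head = next(it, None)
--     while head is not None:
--         group = [head]
--         length = 2 + len(head)
--         head = next(it, None)
--         while head is not None and length + 2 + len(head) <= 100:
--             length += 2 + len(head)
--             group.append(head)
--             head = next(it, None)
--         lines.append("# " + ", ".join(group))
--     return lines
-- ===== Notes on version B (the rewrite author's own statement) =====
-- stated objective: alternative
-- what changed: A grows one comment string character-by-character inside an enumerate loop and flushes on overflow; B instead chunks the id list (an arithmetic length counter decides how many ids fit per line) and renders each chunk once with a single join, avoiding repeated candidate-string construction.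
import Mathlib
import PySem

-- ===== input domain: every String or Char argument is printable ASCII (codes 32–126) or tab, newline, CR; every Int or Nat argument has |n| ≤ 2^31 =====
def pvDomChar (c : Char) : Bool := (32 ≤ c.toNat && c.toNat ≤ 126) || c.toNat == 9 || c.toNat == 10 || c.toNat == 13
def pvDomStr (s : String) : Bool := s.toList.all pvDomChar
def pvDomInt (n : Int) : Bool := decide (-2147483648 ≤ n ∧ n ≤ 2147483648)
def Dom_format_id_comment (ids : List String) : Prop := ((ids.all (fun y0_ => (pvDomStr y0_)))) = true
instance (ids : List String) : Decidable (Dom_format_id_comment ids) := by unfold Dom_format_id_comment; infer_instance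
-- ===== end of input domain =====

-- B replaces A's grow-one-string-and-flush loop by a chunking pass (an arithmetic length
-- counter decides how many ids fit per line) plus one join per line; objective: alternative.

-- ===== PORT A =====
-- A's loop step over enumerate(ids): state = (lines, current); strings handled as List Char.
def fmtStep (st : List String × List Char) (p : Int × String) : List String × List Char :=
  let sep : List Char := if p.1 > 0 then [',', ' '] else [' ']
  let candidate := st.2 ++ sep ++ p.2.toList
  if candidate.length > 100 ∧ p.1 > 0 then
    (st.1 ++ [String.ofList st.2], ['#', ' '] ++ p.2.toList)
  else
    (st.1, candidate)

-- A's trailing 'if current != "#": lines.append(current)'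
def fmtFinish (st : List String × List Char) : List String :=
  if st.2 ≠ ['#'] then st.1 ++ [String.ofList st.2] else st.1

def format_id_comment (ids : List String) : List String :=
  if ids = [] then []
  else fmtFinish ((PySem.List.enumerate ids 0).foldl fmtStep ([], ['#']))

-- ===== PORT B =====
-- B's inner while: split off the ids that still fit, given the running line length.
def fitTake (len : Int) : List String → List String × List String
  | [] => ([], [])
  | x :: xs =>
    if len + 2 + (x.toList.length : Int) ≤ 100 then
      let p := fitTake (len + 2 + (x.toList.length : Int)) xs
      (x :: p.1, p.2)
    else ([], x :: xs)

-- needed by format_id_comment_alt's termination argument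
theorem fitTake_snd_length (L : Int) (xs : List String) : (fitTake L xs).2.length ≤ xs.length := by
  induction xs generalizing L with
  | nil => simp [fitTake]
  | cons x xs ih =>
    simp only [fitTake]
    split
    · exact le_trans (ih _) (Nat.le_succ _)
    · simp

-- B's outer while: one line per chunk, rendered with a single join.
def format_id_comment_alt : List String → List String
  | [] => []
  | h :: t =>
    let p := fitTake (2 + (h.toList.length : Int)) t
    String.ofList (['#', ' '] ++ PySem.Chars.join [',', ' '] ((h :: p.1).map String.toList))
      :: format_id_comment_alt p.2
termination_by ids => ids.length
decreasing_by
  simp only [List.length_cons]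
  exact Nat.lt_succ_of_le (fitTake_snd_length _ _)

-- ===== PRECONDITION & SPEC =====
def Spec_format_id_comment (ids : List String) (out : List String) : Prop := out = format_id_comment_alt ids
instance (ids : List String) (out : List String) : Decidable (Spec_format_id_comment ids out) := by unfold Spec_format_id_comment; infer_instance

-- ===== CLAIM (what is proved, stated in full; the proofs are below) =====
def Claim_equal_format_id_comment : Prop := ∀ (ids : List String), Dom_format_id_comment ids → Spec_format_id_comment ids (format_id_comment ids)

-- ===== LEMMAS AND PROOFS =====

-- rendered comment line for a (nonempty) group of ids, as a char list
def render (g : List String) : List Char :=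
  ['#', ' '] ++ PySem.Chars.join [',', ' '] (g.map String.toList)

-- projected length of the line rendering g
def weight (g : List String) : Nat :=
  (g.map (fun s => s.toList.length)).sum + 2 * g.length

theorem alt_nil : format_id_comment_alt [] = [] := by rw [format_id_comment_alt.eq_def]

theorem alt_cons (h : String) (t : List String) :
    format_id_comment_alt (h :: t) =
      String.ofList (render (h :: (fitTake (2 + (h.toList.length : Int)) t).1))
        :: format_id_comment_alt (fitTake (2 + (h.toList.length : Int)) t).2 := by
  rw [format_id_comment_alt.eq_def]
  rfl

theorem join_append_singleton (sep c : List Char) (l : List (List Char)) (hl : l ≠ []) :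
    PySem.Chars.join sep (l ++ [c]) = PySem.Chars.join sep l ++ sep ++ c := by
  induction l with
  | nil => exact absurd rfl hl
  | cons a l ih =>
    cases l with
    | nil => simp [PySem.Chars.join_cons_cons, PySem.Chars.join_singleton]
    | cons b l =>
      have ih' := ih (by simp)
      simp only [List.cons_append] at ih' ⊢
      rw [PySem.Chars.join_cons_cons, PySem.Chars.join_cons_cons, ih']
      simp

theorem render_append (g : List String) (x : String) (hg : g ≠ []) :
    render (g ++ [x]) = render g ++ [',', ' '] ++ x.toList := by
  simp only [render, List.map_append, List.map_cons, List.map_nil]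
  rw [join_append_singleton _ _ _ (by simpa using hg)]
  simp

theorem render_length : ∀ (g : List String), g ≠ [] → (render g).length = weight g
  | [], h => absurd rfl h
  | [a], _ => by
      simp [render, weight, PySem.Chars.join_singleton]
  | a :: b :: g, _ => by
      have h := render_length (b :: g) (by simp)
      simp only [render, List.map_cons, PySem.Chars.join_cons_cons, List.length_append,
        List.length_cons, List.length_nil] at h ⊢
      simp only [weight, List.map_cons, List.sum_cons, List.length_cons] at h ⊢
      omega

theorem render_ne_hash (g : List String) : render g ≠ ['#'] := by
  intro h
  have : (render g).length = 1 := by rw [h]; rfl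
  simp [render] at this

theorem render_singleton (x : String) : render [x] = ['#', ' '] ++ x.toList := by
  simp [render, PySem.Chars.join_singleton]

-- A's tail loop (indices ≥ 1), finished, equals: close the current group as chunked by
-- fitTake from the group's projected length, then B's chunking on the remainder.
theorem loop_eq (rest : List String) :
    ∀ (s : Int) (lines g : List String), g ≠ [] → 1 ≤ s →
    fmtFinish ((PySem.List.enumerate rest s).foldl fmtStep (lines, render g)) =
      lines ++ (String.ofList (render (g ++ (fitTake ((weight g : Int)) rest).1))
        :: format_id_comment_alt ((fitTake ((weight g : Int)) rest).2)) := by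
  induction rest with
  | nil =>
    intro s lines g hg hs
    simp [PySem.List.enumerate_nil, fmtFinish, render_ne_hash, fitTake, alt_nil]
  | cons x rest ih =>
    intro s lines g hg hs
    rw [PySem.List.enumerate_cons]
    simp only [List.foldl_cons]
    have hsep : (if (s : Int) > 0 then ([',', ' '] : List Char) else [' ']) = [',', ' '] :=
      if_pos (by omega)
    have hcand : render g ++ [',', ' '] ++ x.toList = render (g ++ [x]) :=
      (render_append g x hg).symm
    have hlen : (render (g ++ [x])).length = weight g + 2 + x.toList.length := by
      rw [← hcand]
      simp only [List.length_append, render_length g hg, List.length_cons, List.length_nil]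
    by_cases hc : (weight g : Int) + 2 + (x.toList.length : Int) ≤ 100
    · have hcond : ¬ ((render (g ++ [x])).length > 100 ∧ s > 0) := by
        rw [hlen]; omega
      have hstep : fmtStep (lines, render g) (s, x) = (lines, render (g ++ [x])) := by
        simp only [fmtStep, hsep, hcand]
        rw [if_neg hcond]
      rw [hstep]
      have hw : ((weight (g ++ [x]) : Nat) : Int) = (weight g : Int) + 2 + (x.toList.length : Int) := by
        simp [weight]
        omega
      have hih := ih (s + 1) lines (g ++ [x]) (by simp) (by omega)
      rw [hw] at hih
      rw [hih]
      have hfit : fitTake ((weight g : Int)) (x :: rest) =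
          ((x :: (fitTake ((weight g : Int) + 2 + (x.toList.length : Int)) rest).1),
           (fitTake ((weight g : Int) + 2 + (x.toList.length : Int)) rest).2) := by
        simp only [fitTake, if_pos hc]
      rw [hfit]
      simp
    · have hstep : fmtStep (lines, render g) (s, x) =
          (lines ++ [String.ofList (render g)], render [x]) := by
        have hcond : ((render (g ++ [x])).length > 100 ∧ s > 0) := ⟨by rw [hlen]; omega, by omega⟩
        simp only [fmtStep, hsep, hcand, render_singleton]
        rw [if_pos hcond]
      rw [hstep]
      have hw : (2 + (x.toList.length : Int)) = ((weight [x] : Nat) : Int) := by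
        simp [weight]
        omega
      have hih := ih (s + 1) (lines ++ [String.ofList (render g)]) [x] (by simp) (by omega)
      rw [hih]
      have hfit : fitTake ((weight g : Int)) (x :: rest) = ([], x :: rest) := by
        simp only [fitTake, if_neg hc]
      rw [hfit, alt_cons, hw]
      simp

-- ===== VERDICT (by name: the statement is the Claim_ definition above) =====
theorem format_id_comment_spec : Claim_equal_format_id_comment := by
  intro ids _
  unfold Spec_format_id_comment format_id_comment
  cases ids with
  | nil => simp [alt_nil]
  | cons h t =>
    rw [if_neg (by simp)]
    rw [PySem.List.enumerate_cons]
    simp only [List.foldl_cons]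
    have hfirst : fmtStep ([], ['#']) (0, h) = ([], render [h]) := by
      simp [fmtStep, render_singleton]
    rw [hfirst]
    have h01 : (0 : Int) + 1 = 1 := by norm_num
    rw [h01, loop_eq t 1 [] [h] (by simp) (by omega), alt_cons]
    have hw : ((weight [h] : Nat) : Int) = 2 + (h.toList.length : Int) := by
      simp [weight]
      omega
    rw [hw]
    simp
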